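-- pv_equiv track=rewrite | github.com/w1gglyw0bbly/Random-Stuff | CS112Spring2022/rdeangel_242_Final.py | make_format_str
-- ===== SOURCE A (Python) =====
-- def make_format_str(num_reps, num_vals):
--     fstr = ''
--     for x in range(num_reps):
--         for y in range(num_vals):
--             if x == num_reps - 1 and num_reps != 1:
--                 fstr += '{' + str(y) + '}'
--             else:
--                 fstr += '{' + str(y) + '} '
--     return fstr
-- ===== SOURCE B (Python) =====
-- def make_format_str(num_reps, num_vals):
--     if num_reps < 1:
--         return ''
--     spaced = ''.join('{' + str(y) + '} ' for y in range(num_vals))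
--     if num_reps == 1:
--         return spaced
--     nospace = ''.join('{' + str(y) + '}' for y in range(num_vals))
--     return spaced * (num_reps - 1) + nospace
-- ===== Notes on version B (the rewrite author's own statement) =====
-- stated objective: faster
-- what changed: B builds the spaced and unspaced row templates once with joins and replaces the outer repetition loop by string multiplication, instead of A's nested loops with character-by-character += accumulation.
import Mathlib
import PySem

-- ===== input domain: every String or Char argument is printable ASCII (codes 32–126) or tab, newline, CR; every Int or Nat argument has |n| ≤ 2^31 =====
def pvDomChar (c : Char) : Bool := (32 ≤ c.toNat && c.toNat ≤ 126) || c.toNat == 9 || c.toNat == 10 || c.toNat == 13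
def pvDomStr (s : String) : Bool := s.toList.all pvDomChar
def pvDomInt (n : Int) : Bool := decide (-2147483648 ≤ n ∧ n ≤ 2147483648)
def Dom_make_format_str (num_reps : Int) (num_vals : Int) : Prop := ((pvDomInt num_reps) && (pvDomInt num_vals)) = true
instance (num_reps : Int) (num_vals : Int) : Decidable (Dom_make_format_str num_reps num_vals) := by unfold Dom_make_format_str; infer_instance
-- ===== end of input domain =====

-- B builds the two row templates once with joins and replaces the outer repetition loop by
-- string multiplication; A accumulates piece by piece in nested loops.

-- ===== PORT A =====
def make_format_str (num_reps : Int) (num_vals : Int) : String :=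
  (PySem.List.pyRange 0 num_reps 1).foldl (fun fstr x =>
    (PySem.List.pyRange 0 num_vals 1).foldl (fun fstr y =>
      if x = num_reps - 1 ∧ num_reps ≠ 1 then fstr ++ "{" ++ PySem.Int.toStr y ++ "}"
      else fstr ++ "{" ++ PySem.Int.toStr y ++ "} ") fstr) ""

-- ===== PORT B =====
def make_format_str_alt (num_reps : Int) (num_vals : Int) : String :=
  if num_reps < 1 then ""
  else
    let spaced := String.join ((PySem.List.pyRange 0 num_vals 1).map
      (fun y => "{" ++ PySem.Int.toStr y ++ "} "))
    if num_reps = 1 then spaced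
    else
      let nospace := String.join ((PySem.List.pyRange 0 num_vals 1).map
        (fun y => "{" ++ PySem.Int.toStr y ++ "}"))
      -- 'spaced * (num_reps - 1)': Python string repetition (empty for a non-positive count)
      String.ofList (List.flatten (List.replicate (num_reps - 1).toNat spaced.toList)) ++ nospace

-- ===== PRECONDITION & SPEC =====
def Spec_make_format_str (num_reps : Int) (num_vals : Int) (out : String) : Prop := out = make_format_str_alt num_reps num_vals
instance (num_reps : Int) (num_vals : Int) (out : String) : Decidable (Spec_make_format_str num_reps num_vals out) := by unfold Spec_make_format_str; infer_instance

-- ===== CLAIM (what is proved, stated in full; the proofs are below) =====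
def Claim_equal_make_format_str : Prop := ∀ (num_reps : Int) (num_vals : Int), Dom_make_format_str num_reps num_vals → Spec_make_format_str num_reps num_vals (make_format_str num_reps num_vals)

-- ===== LEMMAS AND PROOFS =====

-- inner loop of A, with a fixed suffix per row: appends one joined row
theorem foldl_row_toList (suf : String) (l : List Int) (f : String) :
    (l.foldl (fun acc y => acc ++ "{" ++ PySem.Int.toStr y ++ suf) f).toList
      = f.toList ++ (l.map (fun y => "{".toList ++ (PySem.Int.toStr y).toList ++ suf.toList)).flatten := by
  induction l generalizing f with
  | nil => simp
  | cons a t ih => simp [List.foldl_cons, ih, String.toList_append]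

-- outer loop of A over the non-final rows: a constant append per step
theorem foldl_const_toList {α : Type} (S : String) (l : List α) (f : String) :
    (l.foldl (fun acc (_ : α) => acc ++ S) f).toList
      = f.toList ++ (List.replicate l.length S.toList).flatten := by
  induction l generalizing f with
  | nil => simp
  | cons a t ih => simp [List.foldl_cons, ih, String.toList_append, List.replicate_succ]

-- ===== VERDICT (by name: the statement is the Claim_ definition above) =====
theorem make_format_str_spec : Claim_equal_make_format_str := by
  intro n v _
  unfold Spec_make_format_str make_format_str make_format_str_alt
  by_cases h0 : n < 1
  · rw [PySem.List.pyRange_one_eq_nil (by omega : n ≤ 0)]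
    simp [h0]
  · by_cases h1 : n = 1
    · subst h1
      rw [if_neg (by omega), if_pos rfl]
      rw [show PySem.List.pyRange 0 1 1 = [0] by
        have := PySem.List.pyRange_one_singleton 0; norm_num at this; exact this]
      apply String.toList_inj.mp
      have hcond : ∀ (acc : String) (y : Int),
          (if (0 : Int) = 1 - 1 ∧ (1 : Int) ≠ 1 then acc ++ "{" ++ PySem.Int.toStr y ++ "}"
           else acc ++ "{" ++ PySem.Int.toStr y ++ "} ") = acc ++ "{" ++ PySem.Int.toStr y ++ "} " := by
        intro acc y; rw [if_neg (by omega)]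
      simp only [List.foldl_cons, List.foldl_nil]
      rw [show (fun (fstr : String) (y : Int) =>
            if (0 : Int) = 1 - 1 ∧ (1 : Int) ≠ 1 then fstr ++ "{" ++ PySem.Int.toStr y ++ "}"
            else fstr ++ "{" ++ PySem.Int.toStr y ++ "} ")
          = fun fstr y => fstr ++ "{" ++ PySem.Int.toStr y ++ "} " from funext fun a => funext fun y => hcond a y]
      rw [foldl_row_toList]
      simp [String.join_eq, String.toList_append, Function.comp_def, PySem.Int.toList_toStr]
    · -- n ≥ 2
      have h2 : 2 ≤ n := by omega
      rw [if_neg (by omega), if_neg h1]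
      apply String.toList_inj.mp
      rw [PySem.List.pyRange_one_append 0 (n - 1) n (by omega) (by omega),
          show PySem.List.pyRange (n-1) n 1 = [n-1] by
            have := PySem.List.pyRange_one_singleton (n-1); rw [show n - 1 + 1 = n by ring] at this; exact this,
          List.foldl_append]
      -- non-final rows: each is the spaced row
      rw [PySem.List.foldl_congr_mem (PySem.List.pyRange 0 (n-1) 1) _
        (fun (acc : String) (_ : Int) =>
          acc ++ String.ofList ((PySem.List.pyRange 0 v 1).map
            (fun y => "{".toList ++ (PySem.Int.toStr y).toList ++ "} ".toList)).flatten) ""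
        (by
          intro acc x hx
          have hx' := (PySem.List.mem_pyRange_one).mp hx
          have hne : ¬ (x = n - 1 ∧ n ≠ 1) := by omega
          apply String.toList_inj.mp
          rw [show (fun (fstr : String) (y : Int) =>
                if x = n - 1 ∧ n ≠ 1 then fstr ++ "{" ++ PySem.Int.toStr y ++ "}"
                else fstr ++ "{" ++ PySem.Int.toStr y ++ "} ")
              = fun fstr y => fstr ++ "{" ++ PySem.Int.toStr y ++ "} " from
              funext fun a => funext fun y => if_neg hne]
          rw [foldl_row_toList]
          simp [String.toList_append])]
      -- final row: the unspaced row appended to the accumulator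
      simp only [List.foldl_cons, List.foldl_nil, true_and]
      rw [show (fun (fstr : String) (y : Int) =>
            if n ≠ 1 then fstr ++ "{" ++ PySem.Int.toStr y ++ "}"
            else fstr ++ "{" ++ PySem.Int.toStr y ++ "} ")
          = fun fstr y => fstr ++ "{" ++ PySem.Int.toStr y ++ "}" from
          funext fun a => funext fun y => if_pos h1]
      rw [foldl_row_toList, foldl_const_toList, PySem.List.length_pyRange_one]
      simp [String.join_eq, String.toList_append, Function.comp_def, PySem.Int.toList_toStr]
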